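-- pv_equiv track=rewrite | github.com/lcabrini/pigrizia | pigrizia/monitor/monitor.py | severity
-- ===== SOURCE A (Python) =====
-- def severity(value, thresholds):
--     """
--     Compares a value against a set of severities and returns the
--     highest severity the value is greater than.
--
--     :param int/float value: the value to be tested
--     :param list thresholds: the severity levels
--     :returns: the hightest severity
--     :rtype: str
--     """
--     levels = ('Notice', 'Warning', 'Critical')
--     severity = None
--     for index, threshold in enumerate(thresholds):
--         if value < threshold:
--             return severity
--         else:
--             severity = levels[index]
--     return severity
-- ===== SOURCE B (Python) =====
-- def severity(value, thresholds):
--     levels = ('Notice', 'Warning', 'Critical')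
--
--     def go(ts, lv):
--         # recursion on the threshold/level lists; the answer is built on the
--         # way back up: the deepest frame that was entered supplies its level
--         if not ts or value < ts[0]:
--             return None
--         deeper = go(ts[1:], lv[1:])
--         return deeper if deeper is not None else lv[0]
--
--     return go(list(thresholds), levels)
-- ===== Notes on version B (the rewrite author's own statement) =====
-- stated objective: alternative
-- what changed: Replaces A's iterative scan with a running accumulator by structural recursion over the paired threshold/level lists, with the result constructed on the unwind (the deepest frame entered supplies its level).
import Mathlib
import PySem

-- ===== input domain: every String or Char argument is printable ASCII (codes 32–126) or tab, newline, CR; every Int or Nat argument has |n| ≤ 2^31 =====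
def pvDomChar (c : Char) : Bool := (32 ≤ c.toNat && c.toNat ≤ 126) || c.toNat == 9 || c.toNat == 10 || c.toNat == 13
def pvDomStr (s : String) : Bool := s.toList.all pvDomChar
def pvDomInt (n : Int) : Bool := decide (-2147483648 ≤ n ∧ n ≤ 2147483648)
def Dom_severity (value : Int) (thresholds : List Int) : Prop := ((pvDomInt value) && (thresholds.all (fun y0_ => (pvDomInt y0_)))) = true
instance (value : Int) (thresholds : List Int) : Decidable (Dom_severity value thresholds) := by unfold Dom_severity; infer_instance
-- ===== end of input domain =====

-- B replaces A's iterative accumulator scan by structural recursion over the paired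
-- threshold/level lists, building the result on the unwind: alternative, same cost.


def sevLevels : List String := ["Notice", "Warning", "Critical"]

-- ===== PORT A =====
-- the for-loop of A: acc is the running `severity`, idx the enumerate index;
-- `levels[index]` is ported as pyGet? (none = IndexError, excluded by Pre_)
def sevLoop (value : Int) (acc : Option String) (idx : Nat) : List Int → Option String
  | [] => acc
  | t :: rest =>
    if value < t then acc
    else
      match PySem.List.pyGet? sevLevels (idx : Int) with
      | none => none
      | some l => sevLoop value (some l) (idx + 1) rest

def severity (value : Int) (thresholds : List Int) : Option String :=
  sevLoop value none 0 thresholds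

-- ===== PORT B =====
-- B's inner `go`: recursion on the two lists; the deepest frame entered supplies
-- its level on the unwind. `lv[0]` is pyGet? (none = IndexError, excluded by Pre_).
def sevGo (value : Int) : List Int → List String → Option String
  | [], _ => none
  | t :: rest, lv =>
    if value < t then none
    else
      match sevGo value rest (lv.drop 1) with
      | some r => some r
      | none =>
        match PySem.List.pyGet? lv (0 : Int) with
        | some l => some l
        | none => none

def severity_alt (value : Int) (thresholds : List Int) : Option String :=
  sevGo value thresholds sevLevels

-- ===== PRECONDITION & SPEC =====
-- Pre_ excludes exactly the inputs where the Python A raises IndexError (levels[3] with only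
-- three levels): value ≥ each of the first four thresholds. B raises IndexError there too.
def Pre_severity (value : Int) (thresholds : List Int) : Prop :=
  thresholds.length ≤ 3 ∨ ∃ t ∈ thresholds.take 4, value < t
instance (value : Int) (thresholds : List Int) : Decidable (Pre_severity value thresholds) := by
  unfold Pre_severity; infer_instance

def pvWitness_severity : Int × List Int := (5, [1, 3, 8])

def Spec_severity (value : Int) (thresholds : List Int) (out : Option String) : Prop := out = severity_alt value thresholds
instance (value : Int) (thresholds : List Int) (out : Option String) : Decidable (Spec_severity value thresholds out) := by unfold Spec_severity; infer_instance

-- ===== CLAIM (what is proved, stated in full; the proofs are below) =====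
def Claim_equal_severity : Prop := ∀ (value : Int) (thresholds : List Int), Dom_severity value thresholds → Pre_severity value thresholds → Spec_severity value thresholds (severity value thresholds)

-- ===== LEMMAS AND PROOFS =====
-- k = the number of leading thresholds the value meets (first break index)
def sevCount (value : Int) : List Int → Nat
  | [] => 0
  | t :: rest => if value < t then 0 else 1 + sevCount value rest

lemma sevCount_le_length (value : Int) (ts : List Int) : sevCount value ts ≤ ts.length := by
  induction ts with
  | nil => simp [sevCount]
  | cons t rest ih =>
    simp only [sevCount, List.length_cons]
    split <;> omega

lemma sevCount_le_of_lt (value : Int) (ts : List Int) (i : Nat) (hi : i < ts.length)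
    (h : value < ts[i]) : sevCount value ts ≤ i := by
  induction ts generalizing i with
  | nil => simp at hi
  | cons t rest ih =>
    cases i with
    | zero =>
      simp only [List.getElem_cons_zero] at h
      simp [sevCount, h]
    | succ j =>
      simp only [List.getElem_cons_succ] at h
      simp only [sevCount]
      split
      · omega
      · have := ih j (by simpa using Nat.lt_of_succ_lt_succ (by simpa using hi)) h
        omega

lemma pre_count_le (value : Int) (ts : List Int) (h : Pre_severity value ts) :
    sevCount value ts ≤ 3 := by
  cases h with
  | inl h => exact le_trans (sevCount_le_length value ts) h
  | inr h =>
    obtain ⟨t, ht, hlt⟩ := h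
    obtain ⟨i, hi, hit⟩ := List.mem_iff_getElem.mp ht
    have hlen : (List.take 4 ts).length = min 4 ts.length := List.length_take
    have hi4 : i < 4 := by omega
    have hilen : i < ts.length := by omega
    rw [List.getElem_take] at hit
    have := sevCount_le_of_lt value ts i hilen (hit ▸ hlt)
    omega

-- A's loop computes levels[k-1] (or the accumulator if k = 0)
lemma sevLoop_eq (value : Int) (ts : List Int) : ∀ (idx : Nat) (acc : Option String),
    idx + sevCount value ts ≤ 3 →
    sevLoop value acc idx ts =
      if sevCount value ts = 0 then acc
      else PySem.List.pyGet? sevLevels ((idx : Int) + (sevCount value ts : Int) - 1) := by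
  induction ts with
  | nil => intro idx acc h; simp [sevLoop, sevCount]
  | cons t rest ih =>
    intro idx acc h
    by_cases hv : value < t
    · simp [sevLoop, sevCount, hv]
    · simp only [sevCount, if_neg hv] at h ⊢
      simp only [sevLoop, if_neg hv]
      have hidx : idx < 3 := by omega
      have hget : PySem.List.pyGet? sevLevels ((idx : Nat) : Int) = some sevLevels[idx] :=
        PySem.List.pyGet?_ofNat sevLevels idx (by simpa [sevLevels] using hidx)
      rw [hget]
      show sevLoop value (some sevLevels[idx]) (idx + 1) rest = _
      refine (ih (idx + 1) (some sevLevels[idx]) (by omega)).trans ?_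
      rw [if_neg (by omega : ¬ 1 + sevCount value rest = 0)]
      by_cases hz : sevCount value rest = 0
      · have he : ((idx : Int) + ((1 + sevCount value rest : Nat) : Int) - 1) = (idx : Int) := by
          rw [hz]; push_cast; ring
        rw [he, if_pos hz, hget]
      · rw [if_neg hz]
        congr 1
        push_cast
        ring

-- B's recursion computes lv[k-1] (or none if k = 0), for any level list long enough
lemma sevGo_eq (value : Int) (ts : List Int) : ∀ (lv : List String)
    (hlen : sevCount value ts ≤ lv.length),
    sevGo value ts lv =
      if h : sevCount value ts = 0 then none
      else some (lv[sevCount value ts - 1]'(by omega)) := by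
  induction ts with
  | nil => intro lv h; simp [sevGo, sevCount]
  | cons t rest ih =>
    intro lv h
    by_cases hv : value < t
    · simp [sevGo, sevCount, hv]
    · simp only [sevCount, if_neg hv] at h ⊢
      obtain ⟨l, lv', rfl⟩ : ∃ l lv', lv = l :: lv' := by
        cases lv with
        | nil => simp at h
        | cons a b => exact ⟨a, b, rfl⟩
      simp only [sevGo, if_neg hv, List.drop_one, List.tail_cons]
      rw [ih lv' (by simp at h; omega)]
      by_cases hz : sevCount value rest = 0
      · simp [hz, PySem.List.pyGet?, PySem.List.pyIdx?]
      · simp only [dif_neg hz, dif_neg (by omega : ¬ 1 + sevCount value rest = 0)]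
        have : 1 + sevCount value rest - 1 = sevCount value rest := by omega
        simp [this, List.getElem_cons, hz]

theorem severity_spec_aux (value : Int) (ts : List Int) (h : Pre_severity value ts) :
    severity value ts = severity_alt value ts := by
  have hc := pre_count_le value ts h
  unfold severity severity_alt
  rw [sevLoop_eq value ts 0 none (by omega),
      sevGo_eq value ts sevLevels (by simp [sevLevels]; omega)]
  by_cases hz : sevCount value ts = 0
  · simp [hz]
  · rw [if_neg hz, dif_neg hz]
    have h1 : ((0:Nat) : Int) + (sevCount value ts : Int) - 1 = ((sevCount value ts - 1 : Nat) : Int) := by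
      push_cast [Nat.cast_sub (by omega : 1 ≤ sevCount value ts)]; ring
    rw [h1]
    exact PySem.List.pyGet?_ofNat sevLevels _ (by simp [sevLevels]; omega)

-- ===== VERDICT (by name: the statement is the Claim_ definition above) =====
theorem severity_spec : Claim_equal_severity := by
  intro value thresholds _ hpre
  exact severity_spec_aux value thresholds hpre
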